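-- pv_equiv track=rewrite | github.com/ljtijhuis/aoc_2024_py | src/day14.py | calc_longest_row_sequence
-- ===== SOURCE A (Python) =====
-- def calc_longest_row_sequence(positions, width, height):
--     longest = 0
--     for row in range(height):
--         current = 0
--         for col in range(width):
--             num = positions.get((col, row))
--             if not num == None:
--                 current += 1
--                 longest = max(longest, current)
--             else:
--                 current = 0
--     return longest
-- ===== SOURCE B (Python) =====
-- def calc_longest_row_sequence(positions, width, height):
--     cells = sorted({(r, c) for (c, r) in positions
--                     if 0 <= c < width and 0 <= r < height})
--     longest = 0
--     cur = 0
--     prev = None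
--     for rc in cells:
--         r, c = rc
--         cur = cur + 1 if prev == (r, c - 1) else 1
--         prev = rc
--         longest = max(longest, cur)
--     return longest
-- ===== Notes on version B (the rewrite author's own statement) =====
-- stated objective: faster
-- what changed: A scans every (col,row) cell of the width x height grid with a dict lookup per cell; B collects the distinct in-bounds occupied cells once, sorts them by (row, col), and finds the longest run of consecutive columns in a single pass over the occupied cells.
import Mathlib
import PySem

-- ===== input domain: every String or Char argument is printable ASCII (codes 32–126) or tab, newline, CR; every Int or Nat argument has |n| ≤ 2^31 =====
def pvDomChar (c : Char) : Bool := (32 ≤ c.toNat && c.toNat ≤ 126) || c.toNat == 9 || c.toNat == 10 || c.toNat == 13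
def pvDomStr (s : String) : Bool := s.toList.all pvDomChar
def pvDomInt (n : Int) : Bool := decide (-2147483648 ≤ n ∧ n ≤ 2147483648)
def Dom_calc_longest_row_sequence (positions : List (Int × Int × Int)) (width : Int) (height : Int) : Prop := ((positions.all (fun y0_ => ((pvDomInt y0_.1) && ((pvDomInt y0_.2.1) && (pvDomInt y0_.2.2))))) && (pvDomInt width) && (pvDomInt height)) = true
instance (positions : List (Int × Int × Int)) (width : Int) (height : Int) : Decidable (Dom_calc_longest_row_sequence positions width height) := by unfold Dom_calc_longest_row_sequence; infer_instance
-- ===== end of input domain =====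

-- B replaces A's scan of the whole width×height grid by sorting the distinct in-bounds
-- occupied cells by (row, col) and finding the longest run of consecutive columns in one
-- pass over the cells (objective: faster — O(cells log cells) instead of O(width·height)).

-- ===== PORT A =====
-- positions is a Python dict keyed by (col, row); entries are flattened to (col, row, value),
-- positions.get((col, row)) is ported as find? on the first two components.
def calc_longest_row_sequence (positions : List (Int × Int × Int)) (width : Int) (height : Int) : Int :=
  (PySem.List.pyRange 0 height 1).foldl (fun longest row =>
    ((PySem.List.pyRange 0 width 1).foldl (fun (st : Int × Int) col =>
        match positions.find? (fun t => t.1 == col && t.2.1 == row) with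
        | some _ => (max st.1 (st.2 + 1), st.2 + 1)
        | none => (st.1, 0)) (longest, 0)).1) 0

-- ===== PORT B =====
-- the set {(r, c) for (c, r) in positions if in bounds}; sorted(cells) is sorted2 on the
-- (row, col) tuple (order-independent consumption of the set: identity key is injective).
def calc_longest_row_sequence_alt (positions : List (Int × Int × Int)) (width : Int) (height : Int) : Int :=
  let cells : PySem.Set (Int × Int) :=
    PySem.Set.ofList ((positions.filter
        (fun t => decide (0 ≤ t.1 ∧ t.1 < width ∧ 0 ≤ t.2.1 ∧ t.2.1 < height))).map
      (fun t => (t.2.1, t.1)))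
  ((PySem.List.sorted2 cells (fun rc => rc.1) (fun rc => rc.2)).foldl
    (fun (st : Int × Int × Option (Int × Int)) rc =>
      let cur := if st.2.2 == some (rc.1, rc.2 - 1) then st.2.1 + 1 else 1
      (max st.1 cur, cur, some rc)) (0, 0, none)).1

-- ===== PRECONDITION & SPEC =====
def Spec_calc_longest_row_sequence (positions : List (Int × Int × Int)) (width : Int) (height : Int) (out : Int) : Prop := out = calc_longest_row_sequence_alt positions width height
instance (positions : List (Int × Int × Int)) (width : Int) (height : Int) (out : Int) : Decidable (Spec_calc_longest_row_sequence positions width height out) := by unfold Spec_calc_longest_row_sequence; infer_instance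

-- ===== CLAIM (what is proved, stated in full; the proofs are below) =====
def Claim_equal_calc_longest_row_sequence : Prop := ∀ (positions : List (Int × Int × Int)) (width : Int) (height : Int), Dom_calc_longest_row_sequence positions width height → Spec_calc_longest_row_sequence positions width height (calc_longest_row_sequence positions width height)

-- ===== LEMMAS AND PROOFS =====

-- occupancy test: is (c, r) a key of positions?
def auxOcc (P : List (Int × Int × Int)) (c r : Int) : Bool :=
  P.any (fun t => t.1 == c && t.2.1 == r)

-- A's inner-loop body
def auxStepA (P : List (Int × Int × Int)) (row : Int) (st : Int × Int) (col : Int) : Int × Int :=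
  if auxOcc P col row then (max st.1 (st.2 + 1), st.2 + 1) else (st.1, 0)

-- B's scan body
def auxStepB (st : Int × Int × Option (Int × Int)) (rc : Int × Int) : Int × Int × Option (Int × Int) :=
  let cur := if st.2.2 == some (rc.1, rc.2 - 1) then st.2.1 + 1 else 1
  (max st.1 cur, cur, some rc)

-- occupied columns of row r among cols [0, k)
def auxCols (P : List (Int × Int × Int)) (r : Int) (k : Int) : List Int :=
  (PySem.List.pyRange 0 k).filter (fun c => auxOcc P c r)

def auxBlk (P : List (Int × Int × Int)) (w r : Int) : List (Int × Int) :=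
  (auxCols P r w).map (fun c => (r, c))

-- the reference cell list: rows ascending, columns ascending within a row
def auxR (P : List (Int × Int × Int)) (w h : Int) : List (Int × Int) :=
  (PySem.List.pyRange 0 h).flatMap (auxBlk P w)

-- Python's lexicographic strict comparison on (row, col), as sorted2 uses it
def auxBefore (a b : Int × Int) : Bool :=
  decide (a.1 < b.1) || (!decide (b.1 < a.1) && decide (a.2 < b.2))

lemma auxBefore_trans (a b c : Int × Int) (h1 : auxBefore a b = true) (h2 : auxBefore b c = true) :
    auxBefore a c = true := by
  simp only [auxBefore, Bool.or_eq_true, Bool.and_eq_true, Bool.not_eq_true',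
    decide_eq_true_eq, decide_eq_false_iff_not] at *
  omega

lemma auxBefore_asym (a b : Int × Int) (h : auxBefore a b = true) : auxBefore b a = false := by
  simp [auxBefore] at h ⊢; omega

lemma auxBefore_conn (a b : Int × Int) (h1 : auxBefore a b = false) (h2 : auxBefore b a = false) :
    a = b := by
  obtain ⟨a1,a2⟩ := a; obtain ⟨b1,b2⟩ := b
  simp [auxBefore] at h1 h2
  have : a1 = b1 ∧ a2 = b2 := by omega
  simp [this.1, this.2]

-- insertBy preserves "pairwise not-after"
lemma aux_insertBy_pairwise (x : Int × Int) (l : List (Int × Int))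
    (hl : l.Pairwise (fun a b => auxBefore b a = false)) :
    (PySem.List.insertBy auxBefore x l).Pairwise (fun a b => auxBefore b a = false) := by
  induction l with
  | nil => simp [PySem.List.insertBy]
  | cons y ys ih =>
    rw [List.pairwise_cons] at hl
    rw [PySem.List.insertBy]
    by_cases h : auxBefore x y = true
    · simp only [h, if_pos]
      rw [List.pairwise_cons]
      refine ⟨?_, List.pairwise_cons.mpr hl⟩
      intro z hz
      rcases List.mem_cons.mp hz with rfl | hz'
      · exact auxBefore_asym _ _ h
      · by_contra hc
        have hzx : auxBefore z x = true := by
          cases hzx : auxBefore z x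
          · exact absurd hzx hc
          · rfl
        have := auxBefore_trans z x y hzx h
        rw [hl.1 z hz'] at this
        exact Bool.false_ne_true this
    · rw [if_neg h]
      rw [List.pairwise_cons]
      refine ⟨?_, ih hl.2⟩
      intro z hz
      rcases (PySem.List.insertBy_mem_iff _ _ _ _).mp hz with rfl | hz'
      · simpa using h
      · exact hl.1 z hz'

lemma aux_sorted2_pairwise (xs : List (Int × Int)) :
    (PySem.List.sorted2 xs (fun rc => rc.1) (fun rc => rc.2)).Pairwise
      (fun a b => auxBefore b a = false) := by
  show (xs.foldl (fun acc x => PySem.List.insertBy auxBefore x acc) []).Pairwise _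
  have gen : ∀ (l : List (Int × Int)) (acc : List (Int × Int)),
      acc.Pairwise (fun a b => auxBefore b a = false) →
      (l.foldl (fun acc x => PySem.List.insertBy auxBefore x acc) acc).Pairwise
        (fun a b => auxBefore b a = false) := by
    intro l
    induction l with
    | nil => intro acc h; exact h
    | cons x l ih => intro acc h; exact ih _ (aux_insertBy_pairwise x acc h)
  exact gen xs [] (by simp)

-- any strictly auxBefore-increasing rearrangement of xs IS sorted2 xs
lemma aux_sorted2_eq (xs ys : List (Int × Int)) (hperm : ys.Perm xs)
    (hpw : ys.Pairwise (fun a b => auxBefore a b = true)) :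
    PySem.List.sorted2 xs (fun rc => rc.1) (fun rc => rc.2) = ys := by
  have hs := aux_sorted2_pairwise xs
  have hperm2 : (PySem.List.sorted2 xs (fun rc => rc.1) (fun rc => rc.2)).Perm ys :=
    (PySem.List.sorted2_perm xs _ _ _).trans hperm.symm
  have hys : ys.Pairwise (fun a b => auxBefore b a = false) :=
    hpw.imp (fun h => auxBefore_asym _ _ h)
  exact List.eq_of_perm_of_sorted
    (fun a b _ _ h1 h2 => auxBefore_conn a b h2 h1) hs hys hperm2

lemma aux_memR (P : List (Int × Int × Int)) (w h : Int) (x : Int × Int) :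
    x ∈ auxR P w h ↔ (0 ≤ x.1 ∧ x.1 < h ∧ 0 ≤ x.2 ∧ x.2 < w ∧ auxOcc P x.2 x.1 = true) := by
  simp only [auxR, auxBlk, auxCols, List.mem_flatMap, List.mem_map, List.mem_filter,
    PySem.List.mem_pyRange_one]
  constructor
  · rintro ⟨r, ⟨hr0, hrh⟩, c, ⟨⟨hc0, hcw⟩, hocc⟩, rfl⟩
    exact ⟨hr0, hrh, hc0, hcw, hocc⟩
  · rintro ⟨h1, h2, h3, h4, h5⟩
    exact ⟨x.1, ⟨h1, h2⟩, x.2, ⟨⟨h3, h4⟩, h5⟩, rfl⟩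

lemma aux_pairwiseR (P : List (Int × Int × Int)) (w h : Int) :
    (auxR P w h).Pairwise (fun a b => auxBefore a b = true) := by
  rw [auxR, List.pairwise_flatMap]
  constructor
  · intro r _
    rw [auxBlk, List.pairwise_map]
    refine List.Pairwise.imp ?_ ((PySem.List.pairwise_lt_pyRange_one 0 w).filter _)
    intro a b hab
    simp [auxBefore]; omega
  · refine List.Pairwise.imp ?_ (PySem.List.pairwise_lt_pyRange_one 0 h)
    intro r1 r2 hr x hx y hy
    rw [auxBlk, List.mem_map] at hx hy
    obtain ⟨c1, _, rfl⟩ := hx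
    obtain ⟨c2, _, rfl⟩ := hy
    simp [auxBefore]; omega

lemma aux_nodupR (P : List (Int × Int × Int)) (w h : Int) : (auxR P w h).Nodup := by
  refine List.Pairwise.imp ?_ (aux_pairwiseR P w h)
  intro a b hab heq
  subst heq
  simp [auxBefore] at hab

-- the sorted cell set of B equals the reference list
lemma aux_cells_eq (P : List (Int × Int × Int)) (w h : Int) :
    PySem.List.sorted2
      (PySem.Set.ofList ((P.filter
          (fun t => decide (0 ≤ t.1 ∧ t.1 < w ∧ 0 ≤ t.2.1 ∧ t.2.1 < h))).map
        (fun t => (t.2.1, t.1))))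
      (fun rc => rc.1) (fun rc => rc.2) = auxR P w h := by
  apply aux_sorted2_eq _ _ _ (aux_pairwiseR P w h)
  rw [List.perm_ext_iff_of_nodup (aux_nodupR P w h) (PySem.Set.nodup_ofList _)]
  intro x
  rw [aux_memR, PySem.Set.mem_ofList]
  simp only [List.mem_map, List.mem_filter, decide_eq_true_eq, auxOcc, List.any_eq_true,
    Bool.and_eq_true, beq_iff_eq]
  constructor
  · rintro ⟨h1, h2, h3, h4, t, ht, hc, hr⟩
    exact ⟨t, ⟨ht, by omega⟩, by rw [hr, hc]⟩
  · rintro ⟨t, ⟨ht, hb⟩, rfl⟩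
    exact ⟨by omega, by omega, by omega, by omega, t, ht, rfl, rfl⟩

-- the crux: A's scan of row r over cols [0, k) against B's scan of the occupied-cell block
lemma aux_row (P : List (Int × Int × Int)) (r : Int) (k : Nat) (L cur0 : Int)
    (p₀ : Option (Int × Int)) (hp : ∀ c : Int, p₀ ≠ some (r, c)) :
    (PySem.List.pyRange 0 (k : Int)).foldl (auxStepA P r) (L, 0)
      = ( (((auxCols P r k).map (fun c => ((r, c) : Int × Int))).foldl auxStepB (L, cur0, p₀)).1,
          if (auxCols P r k).getLast? = some ((k : Int) - 1)
          then (((auxCols P r k).map (fun c => ((r, c) : Int × Int))).foldl auxStepB (L, cur0, p₀)).2.1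
          else 0 )
    ∧ (((auxCols P r k).map (fun c => ((r, c) : Int × Int))).foldl auxStepB (L, cur0, p₀)).2.2
        = ((auxCols P r k).getLast?).elim p₀ (fun c => some (r, c)) := by
  induction k with
  | zero =>
    simp [auxCols, PySem.List.pyRange_one_eq_nil (le_refl 0)]
  | succ k ih =>
    obtain ⟨ih1, ih2⟩ := ih
    have h0k : (0:Int) ≤ (k:Int) := by positivity
    have hcast : (((k+1 : Nat) : Int)) = (k : Int) + 1 := by push_cast; ring
    have hsub : ((k:Int) + 1 - 1) = (k:Int) := by ring
    have hcols : auxCols P r ((k:Int)+1)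
        = auxCols P r (k:Int) ++ (if auxOcc P (k:Int) r = true then [(k:Int)] else []) := by
      rw [auxCols, auxCols, PySem.List.pyRange_one_succ_right h0k, List.filter_append]
      congr 1
      rw [List.filter_singleton]
      cases auxOcc P (k:Int) r <;> simp
    rw [hcast, hsub, hcols, PySem.List.pyRange_one_succ_right h0k]
    rw [List.foldl_append, ih1]
    by_cases hocc : auxOcc P (k:Int) r = true
    · rw [if_pos hocc]
      rw [List.map_append, List.foldl_append]
      simp only [List.foldl_cons, List.foldl_nil, List.map_cons, List.map_nil,
        List.getLast?_concat]
      cases hl : (auxCols P r (k:Int)).getLast? with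
      | none =>
        rw [hl] at ih2
        simp only [Option.elim] at ih2
        have hne : (p₀ == some (r, (k:Int) - 1)) = false := beq_eq_false_iff_ne.mpr (hp _)
        refine ⟨?_, by simp [auxStepB]⟩
        rw [auxStepA, if_pos hocc, auxStepB]
        simp [ih2, hne]
      | some c0 =>
        rw [hl] at ih2
        simp only [Option.elim] at ih2
        refine ⟨?_, by simp [auxStepB]⟩
        rw [auxStepA, if_pos hocc, auxStepB]
        by_cases hc : c0 = (k:Int) - 1
        · subst hc
          simp [ih2]
        · have hne : ((some (r, c0) : Option (Int × Int)) == some (r, (k:Int) - 1)) = false := by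
            rw [beq_eq_false_iff_ne]
            intro hcon
            exact hc (by simpa using hcon)
          simp [ih2, hne, hc]
    · rw [if_neg hocc, List.append_nil]
      have hlast : ¬ (auxCols P r (k:Int)).getLast? = some (k:Int) := by
        intro hl
        have hmem := List.mem_of_getLast? hl
        rw [auxCols, List.mem_filter, PySem.List.mem_pyRange_one] at hmem
        omega
      refine ⟨?_, ih2⟩
      simp only [List.foldl_cons, List.foldl_nil]
      rw [auxStepA, if_neg hocc, if_neg hlast]


lemma aux_range_toNat (w : Int) : PySem.List.pyRange 0 w = PySem.List.pyRange 0 ((w.toNat : Nat) : Int) := by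
  by_cases h : 0 ≤ w
  · rw [Int.toNat_of_nonneg h]
  · rw [PySem.List.pyRange_one_eq_nil (by omega), PySem.List.pyRange_one_eq_nil (by omega)]

-- outer induction over the rows
lemma aux_outer (P : List (Int × Int × Int)) (w : Int) (k : Nat) :
    (PySem.List.pyRange 0 (k : Int)).foldl
        (fun L r => ((PySem.List.pyRange 0 w).foldl (auxStepA P r) (L, 0)).1) 0
      = (((PySem.List.pyRange 0 (k : Int)).flatMap (auxBlk P w)).foldl auxStepB (0, 0, none)).1
    ∧ ((((PySem.List.pyRange 0 (k : Int)).flatMap (auxBlk P w)).foldl auxStepB (0, 0, none)).2.2 = none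
        ∨ ∃ r' c', (((PySem.List.pyRange 0 (k : Int)).flatMap (auxBlk P w)).foldl auxStepB (0, 0, none)).2.2
            = some (r', c') ∧ r' < (k : Int)) := by
  induction k with
  | zero =>
    simp [PySem.List.pyRange_one_eq_nil (le_refl 0)]
  | succ k ih =>
    obtain ⟨ih1, ih2⟩ := ih
    have h0k : (0:Int) ≤ (k:Int) := by positivity
    have hcast : (((k+1 : Nat) : Int)) = (k : Int) + 1 := by push_cast; ring
    rw [hcast, PySem.List.pyRange_one_succ_right h0k, List.flatMap_append, List.foldl_append,
      List.foldl_append]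
    simp only [List.foldl_cons, List.foldl_nil, List.flatMap_cons, List.flatMap_nil,
      List.append_nil]
    -- the B-state reached so far
    set G := (((PySem.List.pyRange 0 (k : Int)).flatMap (auxBlk P w)).foldl auxStepB (0, 0, none)) with hG
    have hp : ∀ c : Int, G.2.2 ≠ some ((k : Int), c) := by
      intro c hcon
      rcases ih2 with h | ⟨r', c', heq, hlt⟩
      · rw [h] at hcon; exact (by simp at hcon)
      · rw [heq] at hcon
        have : r' = (k:Int) := by simpa using congrArg (fun o => (Option.getD o (0,0)).1) hcon
        omega
    have hrow := aux_row P (k:Int) w.toNat G.1 G.2.1 G.2.2 hp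
    have hwr : PySem.List.pyRange 0 w = PySem.List.pyRange 0 ((w.toNat : Nat) : Int) :=
      aux_range_toNat w
    have hblk : auxBlk P w (k:Int) = (auxCols P (k:Int) ((w.toNat : Nat) : Int)).map
        (fun c => (((k:Int)), c)) := by
      rw [auxBlk, auxCols, auxCols, ← hwr]
    rw [ih1, hwr, hblk]
    have hfold : List.foldl auxStepB G ((auxCols P (k:Int) ((w.toNat : Nat) : Int)).map
        (fun c => (((k:Int)), c))) = List.foldl auxStepB (G.1, G.2.1, G.2.2) _ := rfl
    constructor
    · rw [hfold]
      exact congrArg Prod.fst hrow.1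
    · rw [hfold, hrow.2]
      cases hl : (auxCols P (k:Int) ((w.toNat : Nat) : Int)).getLast? with
      | none =>
        simp only [Option.elim]
        rcases ih2 with h | ⟨r', c', heq, hlt⟩
        · left; exact h
        · right; exact ⟨r', c', heq, by omega⟩
      | some c0 =>
        right
        exact ⟨(k:Int), c0, rfl, by omega⟩


lemma aux_A_shape (P : List (Int × Int × Int)) (w h : Int) :
    calc_longest_row_sequence P w h
      = (PySem.List.pyRange 0 h).foldl
          (fun L r => ((PySem.List.pyRange 0 w).foldl (auxStepA P r) (L, 0)).1) 0 := by
  unfold calc_longest_row_sequence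
  congr 1
  funext L r
  congr 1
  congr 1
  funext st col
  rw [auxStepA, auxOcc]
  cases hf : P.find? (fun t => t.1 == col && t.2.1 == r) with
  | none =>
    have : P.any (fun t => t.1 == col && t.2.1 == r) = false := by
      rw [List.any_eq_false]
      intro x hx
      have := List.find?_eq_none.mp hf x hx
      simpa using this
    rw [this]; simp
  | some v =>
    have : P.any (fun t => t.1 == col && t.2.1 == r) = true := by
      rw [List.any_eq_true]
      have hp : ((fun t => t.1 == col && t.2.1 == r) v) = true := List.find?_some (p := fun t : Int × Int × Int => t.1 == col && t.2.1 == r) hf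
      exact ⟨v, List.mem_of_find?_eq_some hf, hp⟩
    rw [this]; simp


lemma aux_B_shape (P : List (Int × Int × Int)) (w h : Int) :
    calc_longest_row_sequence_alt P w h = ((auxR P w h).foldl auxStepB (0, 0, none)).1 := by
  show ((PySem.List.sorted2 _ _ _).foldl _ (0, 0, none)).1 = _
  rw [aux_cells_eq]
  rfl


-- ===== VERDICT (by name: the statement is the Claim_ definition above) =====
theorem calc_longest_row_sequence_spec : Claim_equal_calc_longest_row_sequence := by
  intro P w h _
  show calc_longest_row_sequence P w h = calc_longest_row_sequence_alt P w h
  rw [aux_A_shape, aux_B_shape, auxR, aux_range_toNat h]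
  exact (aux_outer P w h.toNat).1
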